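-- pv_equiv track=rewrite | github.com/Creation2012/OiAK-LNS | LNS.py | antilogconverter
-- ===== SOURCE A (Python) =====
-- def antilogconverter(mantisa):
--     m = mantisa
--     if m in range(0,160):
--         a = [-2,-6]
--         b = 8188
--     elif m in range(160,288):
--         a = [-2,4]
--         b = 8085
--     elif m in range(288,432):
--         a = [-3,6]
--         b = 7898
--     elif m in range(432,576):
--         a = [-5]
--         b = 7625
--     elif m in range(576,704):
--         a = [4,6]
--         b = 7123
--     elif m in range(704,816):
--         a = [3,5]
--         b = 6680
--     elif m in range(816,944):
--         a = [2,6]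
--         b = 5964
--     elif m in range(944,1024):
--         a = [1,-3]
--         b = 5131
--
--     shifted = m << 3
--     shifted += b
--     shifted += sum([-1 * (m >> abs(i)) if i < 0 else m >> abs(i) for i in a])
--     shifted = shifted >> 3
--
--     return shifted
-- ===== SOURCE B (Python) =====
-- # Binary search over breakpoints + floor-division arithmetic (no shifts, no sum comprehension).
-- _BOUNDS = (160, 288, 432, 576, 704, 816, 944, 1024)
-- _COEFF = (
--     ((-2, -6), 8188),
--     ((-2, 4), 8085),
--     ((-3, 6), 7898),
--     ((-5,), 7625),
--     ((4, 6), 7123),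
--     ((3, 5), 6680),
--     ((2, 6), 5964),
--     ((1, -3), 5131),
-- )
--
-- def antilogconverter(mantisa):
--     m = mantisa
--     lo, hi = 0, 7
--     while lo < hi:
--         mid = (lo + hi) // 2
--         if m < _BOUNDS[mid]:
--             hi = mid
--         else:
--             lo = mid + 1
--     a, b = _COEFF[lo]
--     total = 8 * m + b
--     for i in a:
--         term = m // (1 << abs(i))
--         total = total - term if i < 0 else total + term
--     return total // 8
-- ===== Notes on version B (the rewrite author's own statement) =====
-- stated objective: alternative
-- what changed: B selects the segment by binary search over a breakpoint tuple (instead of A's eight-way if/elif range chain) and computes the result with plain multiply/floor-division arithmetic accumulated in one loop (instead of A's shift-and-sum-comprehension tail).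
import Mathlib
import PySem

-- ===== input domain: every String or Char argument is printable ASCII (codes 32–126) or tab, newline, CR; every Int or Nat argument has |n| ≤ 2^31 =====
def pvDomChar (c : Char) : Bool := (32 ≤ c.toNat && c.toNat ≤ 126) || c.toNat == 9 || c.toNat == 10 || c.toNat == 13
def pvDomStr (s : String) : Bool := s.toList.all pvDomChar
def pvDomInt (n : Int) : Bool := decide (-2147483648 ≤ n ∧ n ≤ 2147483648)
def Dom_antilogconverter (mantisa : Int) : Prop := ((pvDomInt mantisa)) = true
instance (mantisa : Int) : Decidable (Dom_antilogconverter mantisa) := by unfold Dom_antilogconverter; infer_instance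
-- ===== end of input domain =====

-- B replaces A's eight-way if/elif range chain by binary search over a breakpoint table and
-- replaces the shift/sum tail by plain floor-division arithmetic (alternative; same cost).
-- Outside [0, 1024) A raises UnboundLocalError; those inputs are excluded by Pre_ (B's binary search clamps and returns a value there).

-- ===== PORT A =====
-- fall-through case (m outside every range): Python raises UnboundLocalError; returns ([], 0) here, excluded by Pre_
def antilogconverter_ab (m : Int) : List Int × Int :=
  if 0 ≤ m ∧ m < 160 then ([-2, -6], 8188)
  else if 160 ≤ m ∧ m < 288 then ([-2, 4], 8085)
  else if 288 ≤ m ∧ m < 432 then ([-3, 6], 7898)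
  else if 432 ≤ m ∧ m < 576 then ([-5], 7625)
  else if 576 ≤ m ∧ m < 704 then ([4, 6], 7123)
  else if 704 ≤ m ∧ m < 816 then ([3, 5], 6680)
  else if 816 ≤ m ∧ m < 944 then ([2, 6], 5964)
  else if 944 ≤ m ∧ m < 1024 then ([1, -3], 5131)
  else ([], 0)

def antilogconverter (mantisa : Int) : Int :=
  let m := mantisa
  let ab := antilogconverter_ab m
  let a := ab.1
  let b := ab.2
  let shifted := m <<< (3 : Nat)
  let shifted := shifted + b
  let shifted := shifted +
    (a.map (fun (i : Int) => if i < 0 then -1 * (m >>> i.natAbs) else m >>> i.natAbs)).sum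
  shifted >>> (3 : Nat)

-- ===== PORT B =====
def pvBounds : List Int := [160, 288, 432, 576, 704, 816, 944, 1024]

def pvCoeff : List (List Int × Int) :=
  [([-2, -6], 8188), ([-2, 4], 8085), ([-3, 6], 7898), ([-5], 7625),
   ([4, 6], 7123), ([3, 5], 6680), ([2, 6], 5964), ([1, -3], 5131)]

-- the `while lo < hi` loop of Source B; fuel (8 ≥ max iterations) only makes the recursion structural
def pvBsearch (m : Int) : Nat → Nat → Nat → Nat
  | 0, lo, _ => lo
  | fuel + 1, lo, hi =>
      if lo < hi then
        let mid := (lo + hi) / 2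
        if m < (PySem.List.pyGet? pvBounds (mid : Int)).getD 0 then pvBsearch m fuel lo mid
        else pvBsearch m fuel (mid + 1) hi
      else lo

def antilogconverter_alt (mantisa : Int) : Int :=
  let m := mantisa
  let idx := pvBsearch m 8 0 7
  let ab := ((PySem.List.pyGet? pvCoeff (idx : Int)).getD ([], 0) : List Int × Int)
  let total := 8 * m + ab.2
  let total := ab.1.foldl
    (fun (acc : Int) (i : Int) =>
      let term := PySem.Int.floordiv m ((1 : Int) <<< i.natAbs)
      if i < 0 then acc - term else acc + term) total
  PySem.Int.floordiv total 8

-- ===== PRECONDITION & SPEC =====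
-- Pre_ excludes mantisa outside [0, 1024), where the Python A raises UnboundLocalError (no branch binds a/b).
def Pre_antilogconverter (mantisa : Int) : Prop := 0 ≤ mantisa ∧ mantisa < 1024
instance (mantisa : Int) : Decidable (Pre_antilogconverter mantisa) := by unfold Pre_antilogconverter; infer_instance
def pvWitness_antilogconverter : Int := 100

def Spec_antilogconverter (mantisa : Int) (out : Int) : Prop := out = antilogconverter_alt mantisa
instance (mantisa : Int) (out : Int) : Decidable (Spec_antilogconverter mantisa out) := by unfold Spec_antilogconverter; infer_instance

-- ===== CLAIM (what is proved, stated in full; the proofs are below) =====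
def Claim_equal_antilogconverter : Prop := ∀ (mantisa : Int), Dom_antilogconverter mantisa → Pre_antilogconverter mantisa → Spec_antilogconverter mantisa (antilogconverter mantisa)

-- ===== LEMMAS AND PROOFS =====

-- A and B agree on every integer of [0, 1024): checked by exhaustive kernel evaluation
set_option maxRecDepth 10000 in
lemma pv_all_eq :
    ((List.range 1024).all
      (fun n => antilogconverter (n : Int) == antilogconverter_alt (n : Int))) = true := by
  decide

-- ===== VERDICT (by name: the statement is the Claim_ definition above) =====
theorem antilogconverter_spec : Claim_equal_antilogconverter := by
  intro m _ hpre
  unfold Spec_antilogconverter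
  obtain ⟨h0, h1⟩ := hpre
  obtain ⟨n, rfl, hn⟩ : ∃ n : Nat, m = (n : Int) ∧ n < 1024 :=
    ⟨m.toNat, by omega, by omega⟩
  have h := List.all_eq_true.mp pv_all_eq n (List.mem_range.mpr hn)
  simpa using h
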